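-- pv_equiv track=rewrite | github.com/Ready2k/Project3 | app/services/jira_diagnostics.py | _is_version_compatible
-- ===== SOURCE A (Python) =====
-- def _is_version_compatible(version: str) -> bool:
--     """Check if Jira version is compatible."""
--     try:
--         # Parse version string (e.g., "9.12.22" -> [9, 12, 22])
--         version_parts = [int(x) for x in version.split('.')]
--
--         # Minimum version is 8.0.0
--         min_version = [8, 0, 0]
--
--         # Compare version parts
--         for i, (current, minimum) in enumerate(zip(version_parts, min_version)):
--             if current > minimum:
--                 return True
--             elif current < minimum:
--                 return False
--
--         # If all compared parts are equal, check if we have enough parts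
--         return len(version_parts) >= len(min_version)
--
--     except Exception:
--         # If we can't parse the version, assume it's compatible
--         return True
-- ===== SOURCE B (Python) =====
-- def _at_least(parts, mins):
--     """Recursively check parts >= mins (length-aware lexicographic),
--     via the sign of the head difference; the length tie-break is
--     absorbed into the two base cases."""
--     if not mins:
--         return True
--     if not parts:
--         return False
--     d = parts[0] - mins[0]
--     return d > 0 if d else _at_least(parts[1:], mins[1:])
--
--
-- def _is_version_compatible(version: str) -> bool:
--     """Check if Jira version is compatible."""
--     try:
--         parts = [int(x) for x in version.split('.')]
--     except Exception:
--         return True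
--     return _at_least(parts, [8, 0, 0])
-- ===== Notes on version B (the rewrite author's own statement) =====
-- stated objective: alternative
-- what changed: A's iterative zip loop with two comparisons per element plus a separate trailing length tie-break is replaced by a recursive helper on the two lists that branches on the sign of the head difference and absorbs the length rule into its base cases.
import Mathlib
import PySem

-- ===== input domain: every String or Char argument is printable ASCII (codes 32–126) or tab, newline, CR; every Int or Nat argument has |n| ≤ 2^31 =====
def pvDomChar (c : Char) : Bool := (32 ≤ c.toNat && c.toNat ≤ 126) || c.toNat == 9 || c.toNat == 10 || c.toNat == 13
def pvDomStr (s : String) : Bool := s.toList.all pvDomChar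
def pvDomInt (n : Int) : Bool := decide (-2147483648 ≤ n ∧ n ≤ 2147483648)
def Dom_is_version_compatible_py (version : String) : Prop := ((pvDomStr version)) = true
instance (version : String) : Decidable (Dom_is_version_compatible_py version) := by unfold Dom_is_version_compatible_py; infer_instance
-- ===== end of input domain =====

-- B replaces A's iterative zip loop (two comparisons per element plus a trailing length
-- tie-break) by a recursive helper branching on the sign of the head difference, with the
-- length rule absorbed into the base cases (objective: alternative decomposition).

-- ===== PORT A =====
-- the for-loop over zip(version_parts, min_version): some b = early return, none = fell through
def pvLoopA : List (Int × Int) → Option Bool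
  | [] => none
  | (current, minimum) :: rest =>
      if current > minimum then some true
      else if current < minimum then some false
      else pvLoopA rest

def is_version_compatible_py (version : String) : Bool :=
  -- version.split(".") = Str.split? (sep "." ≠ "" so always some); int(x) raising ValueError = a none from ofStr?, taking the except branch
  match (((PySem.Str.split? version ".").getD [])).mapM PySem.Int.ofStr? with
  | none => true
  | some version_parts =>
      match pvLoopA (version_parts.zip ([8, 0, 0] : List Int)) with
      | some b => b
      | none => decide (version_parts.length ≥ ([8, 0, 0] : List Int).length)

-- ===== PORT B =====
-- _at_least: recursion on both lists, branching on the sign of the head difference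
def pvAtLeast : List Int → List Int → Bool
  | _, [] => true
  | [], _ :: _ => false
  | p :: ps, m :: ms =>
      let d := p - m
      if d = 0 then pvAtLeast ps ms else decide (d > 0)

def is_version_compatible_py_alt (version : String) : Bool :=
  match (((PySem.Str.split? version ".").getD [])).mapM PySem.Int.ofStr? with
  | none => true
  | some parts => pvAtLeast parts ([8, 0, 0] : List Int)

-- ===== PRECONDITION & SPEC =====
def Spec_is_version_compatible_py (version : String) (out : Bool) : Prop := out = is_version_compatible_py_alt version
instance (version : String) (out : Bool) : Decidable (Spec_is_version_compatible_py version out) := by unfold Spec_is_version_compatible_py; infer_instance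

-- ===== CLAIM (what is proved, stated in full; the proofs are below) =====
def Claim_equal_is_version_compatible_py : Prop := ∀ (version : String), Dom_is_version_compatible_py version → Spec_is_version_compatible_py version (is_version_compatible_py version)

-- ===== LEMMAS AND PROOFS =====
theorem pvLoop_eq_atLeast (vp mv : List Int) :
    (match pvLoopA (vp.zip mv) with
     | some b => b
     | none => decide (vp.length ≥ mv.length)) = pvAtLeast vp mv := by
  induction vp generalizing mv with
  | nil =>
    cases mv with
    | nil => simp [pvLoopA, pvAtLeast]
    | cons m ms => simp [pvLoopA, pvAtLeast]
  | cons x xs ih =>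
    cases mv with
    | nil => simp [pvLoopA, pvAtLeast]
    | cons m ms =>
      simp only [List.zip_cons_cons, pvLoopA, pvAtLeast]
      by_cases hgt : x > m
      · simp [hgt]; omega
      · by_cases hlt : x < m
        · simp [hgt, hlt]; omega
        · have hd : x - m = 0 := by omega
          simp only [if_neg (by omega : ¬ x > m), if_neg (by omega : ¬ x < m), hd]
          simpa [List.length_cons] using ih ms

-- ===== VERDICT (by name: the statement is the Claim_ definition above) =====
theorem is_version_compatible_py_spec : Claim_equal_is_version_compatible_py := by
  intro version _
  unfold Spec_is_version_compatible_py is_version_compatible_py is_version_compatible_py_alt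
  cases h : (((PySem.Str.split? version ".").getD [])).mapM PySem.Int.ofStr? with
  | none => rfl
  | some parts => exact pvLoop_eq_atLeast parts [8, 0, 0]
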